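-- pv_equiv track=rewrite | github.com/seonghwan97/portfolio | CS512_Computer_Vision/project/src/NICE/Source/log.py | group_list_using_l1
-- ===== SOURCE A (Python) =====
-- def group_list_using_l1(l1, l2):
--     groups_1 = []
--     groups_2 = []
--     for item_1, item_2 in zip(l1, l2):
--         if not groups_1 or item_1 != groups_1[-1][-1]:
--             groups_1.append([item_1])
--             groups_2.append([item_2])
--         else:
--             groups_1[-1].append(item_1)
--             groups_2[-1].append(item_2)
--     return groups_1, groups_2
-- ===== SOURCE B (Python) =====
-- def run_lengths(l):
--     lens = []
--     i = 0
--     while i < len(l):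
--         j = i + 1
--         while j < len(l) and l[j] == l[i]:
--             j += 1
--         lens.append(j - i)
--         i = j
--     return lens
--
--
-- def chop(l, lens):
--     out = []
--     pos = 0
--     for k in lens:
--         out.append(l[pos:pos + k])
--         pos += k
--     return out
--
--
-- def group_list_using_l1(l1, l2):
--     n = min(len(l1), len(l2))
--     t1, t2 = l1[:n], l2[:n]
--     lens = run_lengths(t1)
--     return chop(t1, lens), chop(t2, lens)
-- ===== Notes on version B (the rewrite author's own statement) =====
-- stated objective: alternative
-- what changed: B is staged: it first computes the run-length encoding of l1 by index jumps (a while loop that skips whole runs), then in a second pass slices both truncated lists by those lengths, instead of A's single zip pass that appends to or mutates the last group in place.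
import Mathlib
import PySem

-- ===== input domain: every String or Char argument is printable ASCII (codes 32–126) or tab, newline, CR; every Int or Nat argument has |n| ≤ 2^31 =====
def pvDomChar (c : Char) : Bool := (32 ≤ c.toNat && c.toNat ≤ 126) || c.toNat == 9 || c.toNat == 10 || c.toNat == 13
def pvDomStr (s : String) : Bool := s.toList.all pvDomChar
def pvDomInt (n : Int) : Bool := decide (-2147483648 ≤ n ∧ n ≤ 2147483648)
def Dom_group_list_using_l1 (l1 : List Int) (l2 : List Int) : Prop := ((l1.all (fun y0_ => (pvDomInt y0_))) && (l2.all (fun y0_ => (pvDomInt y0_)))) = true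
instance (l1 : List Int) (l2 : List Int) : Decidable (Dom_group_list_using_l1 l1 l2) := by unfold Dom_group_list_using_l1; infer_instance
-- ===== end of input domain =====

-- B is staged (run-length encoding of l1 by index jumps, then slicing both lists by those
-- lengths) instead of A's single zip pass mutating the last group; objective: alternative.

-- ===== PORT A =====
-- One loop step of A.  `groups_1[-1][-1]` reads the last element of the last group; both
-- lists are nonempty whenever that branch is reached, so `[-1]` is exactly `getLastD`
-- (the defaults are never used).  `groups_1[-1].append(x)` rebuilds the list with its
-- last group extended.
def stepA (st : List (List Int) × List (List Int)) (p : Int × Int) :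
    List (List Int) × List (List Int) :=
  let g1 := st.1
  let g2 := st.2
  if g1 = [] ∨ p.1 ≠ (g1.getLastD []).getLastD 0 then
    (g1 ++ [[p.1]], g2 ++ [[p.2]])
  else
    (g1.dropLast ++ [(g1.getLastD []) ++ [p.1]], g2.dropLast ++ [(g2.getLastD []) ++ [p.2]])

def group_list_using_l1 (l1 : List Int) (l2 : List Int) :
    List (List Int) × List (List Int) :=
  (l1.zip l2).foldl stepA ([], [])

-- ===== PORT B =====
-- Inner loop of Source B's run_lengths: `while j < len(l) and l[j] == l[i]: j += 1`
-- (both indices are nonnegative and in range, so `l[_]` is exactly `getD`).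
def pvInnerJ (l : List Int) (i : Nat) (j : Nat) : Nat :=
  if j < l.length ∧ l.getD j 0 = l.getD i 0 then pvInnerJ l i (j + 1) else j
termination_by l.length - j
decreasing_by omega

-- Needed by pvRunLengthsAux's termination: the inner loop never moves j backwards.
theorem le_pvInnerJ (l : List Int) (i : Nat) : ∀ j, j ≤ pvInnerJ l i j := by
  intro j
  have H : ∀ n j, l.length - j ≤ n → j ≤ pvInnerJ l i j := by
    intro n
    induction n with
    | zero =>
      intro j h
      rw [pvInnerJ]
      split
      · omega
      · exact Nat.le_refl j
    | succ n ih =>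
      intro j h
      rw [pvInnerJ]
      split
      · exact Nat.le_trans (Nat.le_succ j) (ih (j + 1) (by omega))
      · exact Nat.le_refl j
  exact H (l.length - j) j (Nat.le_refl _)

-- Outer `while i < len(l)` loop of Source B's run_lengths (appends j - i, continues at j).
def pvRunLengthsAux (l : List Int) (i : Nat) : List Nat :=
  if i < l.length then
    (pvInnerJ l i (i + 1) - i) :: pvRunLengthsAux l (pvInnerJ l i (i + 1))
  else []
termination_by l.length - i
decreasing_by have := le_pvInnerJ l i (i + 1); omega

def pvRunLengths (l : List Int) : List Nat := pvRunLengthsAux l 0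

-- Source B's chop: `l[pos:pos+k]` with 0 ≤ pos, 0 ≤ k is exactly `(l.drop pos).take k`.
def pvChop (l : List Int) (lens : List Nat) : List (List Int) :=
  (lens.foldl (fun st k => (st.1 ++ [(l.drop st.2).take k], st.2 + k))
    (([] : List (List Int)), 0)).1

def group_list_using_l1_alt (l1 : List Int) (l2 : List Int) :
    List (List Int) × List (List Int) :=
  let n := min l1.length l2.length
  let t1 := l1.take n
  let t2 := l2.take n
  let lens := pvRunLengths t1
  (pvChop t1 lens, pvChop t2 lens)

-- ===== PRECONDITION & SPEC =====
def Spec_group_list_using_l1 (l1 : List Int) (l2 : List Int) (out : List (List Int) × List (List Int)) : Prop := out = group_list_using_l1_alt l1 l2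
instance (l1 : List Int) (l2 : List Int) (out : List (List Int) × List (List Int)) : Decidable (Spec_group_list_using_l1 l1 l2 out) := by unfold Spec_group_list_using_l1; infer_instance

-- ===== CLAIM (what is proved, stated in full; the proofs are below) =====
def Claim_equal_group_list_using_l1 : Prop := ∀ (l1 : List Int) (l2 : List Int), Dom_group_list_using_l1 l1 l2 → Spec_group_list_using_l1 l1 l2 (group_list_using_l1 l1 l2)

-- ===== LEMMAS AND PROOFS =====

-- Common middle form: maximal runs of consecutive pairs with equal first components.
def groupPairs : List (Int × Int) → List (List (Int × Int))
  | [] => []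
  | p :: rest =>
    (p :: rest.takeWhile (fun q => q.1 == p.1)) ::
      groupPairs (rest.dropWhile (fun q => q.1 == p.1))
termination_by l => l.length
decreasing_by
  simpa using Nat.lt_succ_of_le (List.length_dropWhile_le _ _)

-- Recursive form of chop.
def chopR (l : List Int) : List Nat → List (List Int)
  | [] => []
  | k :: rest => l.take k :: chopR (l.drop k) rest

-- Recursive (takeWhile) form of run_lengths.
def rle : List Int → List Nat
  | [] => []
  | x :: xs => ((xs.takeWhile (fun a => a == x)).length + 1) :: rle (xs.dropWhile (fun a => a == x))
termination_by l => l.length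
decreasing_by
  simpa using Nat.lt_succ_of_le (List.length_dropWhile_le _ _)

theorem dropWhile_eq_drop (l : List Int) (p : Int → Bool) :
    l.dropWhile p = l.drop (l.takeWhile p).length := by
  induction l with
  | nil => simp
  | cons a as ih => by_cases h : p a = true <;> simp [h, ih]

theorem takeWhile_eq_take (l : List Int) (p : Int → Bool) :
    l.takeWhile p = l.take (l.takeWhile p).length :=
  List.prefix_iff_eq_take.mp (List.takeWhile_prefix p)

theorem pvInnerJ_char (l : List Int) (i : Nat) : ∀ j,
    pvInnerJ l i j = j + ((l.drop j).takeWhile (fun y => y == l.getD i 0)).length := by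
  have H : ∀ n j, l.length - j ≤ n →
      pvInnerJ l i j = j + ((l.drop j).takeWhile (fun y => y == l.getD i 0)).length := by
    intro n
    induction n with
    | zero =>
      intro j h
      rw [pvInnerJ]
      have hd : l.drop j = [] := List.drop_eq_nil_of_le (by omega)
      rw [if_neg (by omega)]
      simp [hd]
    | succ n ih =>
      intro j h
      set c := l.getD i 0 with hc
      rw [pvInnerJ]
      by_cases hj : j < l.length
      · have hdrop : l.drop j = l.getD j 0 :: l.drop (j + 1) := by
          rw [List.getD_eq_getElem l 0 hj]
          exact List.drop_eq_getElem_cons hj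
        by_cases he : l.getD j 0 = c
        · rw [if_pos ⟨hj, he⟩, ih (j + 1) (by omega), hdrop, List.takeWhile_cons]
          have hb : (l.getD j 0 == c) = true := beq_iff_eq.mpr he
          rw [hb]
          simp only [if_true, List.length_cons]
          omega
        · rw [if_neg (by tauto), hdrop, List.takeWhile_cons]
          have hb : (l.getD j 0 == c) = false := beq_eq_false_iff_ne.mpr he
          rw [hb]
          simp
      · rw [if_neg (by tauto)]
        have hd : l.drop j = [] := List.drop_eq_nil_of_le (by omega)
        simp [hd]
  intro j
  exact H (l.length - j) j (Nat.le_refl _)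

theorem runAux_eq_rle (l : List Int) : ∀ n i, l.length - i ≤ n →
    pvRunLengthsAux l i = rle (l.drop i) := by
  intro n
  induction n with
  | zero =>
    intro i h
    rw [pvRunLengthsAux]
    have hd : l.drop i = [] := List.drop_eq_nil_of_le (by omega)
    rw [if_neg (by omega)]
    simp [hd, rle]
  | succ n ih =>
    intro i h
    rw [pvRunLengthsAux]
    by_cases hi : i < l.length
    · rw [if_pos hi]
      have hgd : l.getD i 0 = l[i] := List.getD_eq_getElem l 0 hi
      have hdrop : l.drop i = l[i] :: l.drop (i + 1) := List.drop_eq_getElem_cons hi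
      set k := ((l.drop (i + 1)).takeWhile (fun y => y == l.getD i 0)).length with hk
      have hj : pvInnerJ l i (i + 1) = (i + 1) + k := pvInnerJ_char l i (i + 1)
      have hrle : rle (l.drop i) =
          (k + 1) :: rle ((l.drop (i + 1)).dropWhile (fun y => y == l.getD i 0)) := by
        rw [hdrop, rle, ← hgd]
      have hdw : (l.drop (i + 1)).dropWhile (fun y => y == l.getD i 0) = l.drop ((i + 1) + k) := by
        rw [dropWhile_eq_drop, List.drop_drop, ← hk]
      rw [hrle, hdw, hj, ih ((i + 1) + k) (by omega)]
      congr 1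
      omega
    · rw [if_neg hi]
      have hd : l.drop i = [] := List.drop_eq_nil_of_le (by omega)
      simp [hd, rle]

theorem chop_fold (l : List Int) : ∀ (lens : List Nat) (acc : List (List Int)) (pos : Nat),
    (lens.foldl (fun st k => (st.1 ++ [(l.drop st.2).take k], st.2 + k)) (acc, pos)).1
      = acc ++ chopR (l.drop pos) lens := by
  intro lens
  induction lens with
  | nil => intro acc pos; simp [chopR]
  | cons k rest ih =>
    intro acc pos
    rw [List.foldl_cons, ih]
    simp [chopR, List.drop_drop, Nat.add_comm]

theorem pvChop_eq (l : List Int) (lens : List Nat) : pvChop l lens = chopR l lens := by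
  unfold pvChop
  rw [chop_fold]
  simp

-- zip/takeWhile/dropWhile bridges (lengths equal, so zip never truncates).
theorem zip_takeWhile_fst (x : Int) : ∀ (xs ys : List Int), xs.length = ys.length →
    ((xs.zip ys).takeWhile (fun q => q.1 == x)).map Prod.fst
      = xs.takeWhile (fun a => a == x) := by
  intro xs
  induction xs with
  | nil => intro ys h; simp
  | cons a as ih =>
    intro ys h
    cases ys with
    | nil => simp at h
    | cons b bs =>
      simp only [List.zip_cons_cons, List.takeWhile_cons]
      by_cases hx : (a == x) = true
      · simp [hx, ih bs (by simpa using h)]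
      · simp [hx]

theorem zip_takeWhile_snd (x : Int) : ∀ (xs ys : List Int), xs.length = ys.length →
    ((xs.zip ys).takeWhile (fun q => q.1 == x)).map Prod.snd
      = ys.take (xs.takeWhile (fun a => a == x)).length := by
  intro xs
  induction xs with
  | nil => intro ys h; simp
  | cons a as ih =>
    intro ys h
    cases ys with
    | nil => simp at h
    | cons b bs =>
      simp only [List.zip_cons_cons, List.takeWhile_cons]
      by_cases hx : (a == x) = true
      · simp [hx, ih bs (by simpa using h)]
      · simp [hx]

theorem zip_dropWhile (x : Int) : ∀ (xs ys : List Int), xs.length = ys.length →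
    (xs.zip ys).dropWhile (fun q => q.1 == x)
      = (xs.dropWhile (fun a => a == x)).zip (ys.drop (xs.takeWhile (fun a => a == x)).length) := by
  intro xs
  induction xs with
  | nil => intro ys h; simp
  | cons a as ih =>
    intro ys h
    cases ys with
    | nil => simp at h
    | cons b bs =>
      simp only [List.zip_cons_cons, List.dropWhile_cons, List.takeWhile_cons]
      by_cases hx : (a == x) = true
      · simp [hx, ih bs (by simpa using h)]
      · simp [hx]

-- Main B-side lemma: chopping by rle lengths yields exactly the groupPairs projections.
theorem chop_rle : ∀ (m : Nat) (t1 t2 : List Int), t1.length ≤ m → t1.length = t2.length →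
    chopR t1 (rle t1) = (groupPairs (t1.zip t2)).map (List.map Prod.fst)
    ∧ chopR t2 (rle t1) = (groupPairs (t1.zip t2)).map (List.map Prod.snd) := by
  intro m
  induction m with
  | zero =>
    intro t1 t2 hm h
    have h1 : t1 = [] := List.eq_nil_of_length_eq_zero (Nat.le_zero.mp hm)
    subst h1
    have h2 : t2 = [] := List.eq_nil_of_length_eq_zero h.symm
    subst h2
    simp [rle, chopR, groupPairs]
  | succ m ih =>
    intro t1 t2 hm h
    cases t1 with
    | nil =>
      have h2 : t2 = [] := List.eq_nil_of_length_eq_zero (by simpa using h.symm)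
      subst h2
      simp [rle, chopR, groupPairs]
    | cons x xs =>
      cases t2 with
      | nil => simp at h
      | cons y ys =>
        have hlen : xs.length = ys.length := by simpa using h
        have hxs : xs.length ≤ m := by
          simp only [List.length_cons] at hm; omega
        have hkle : (xs.takeWhile (fun a => a == x)).length ≤ xs.length :=
          (List.takeWhile_prefix _).length_le
        have htk : xs.take (xs.takeWhile (fun a => a == x)).length
            = xs.takeWhile (fun a => a == x) := (takeWhile_eq_take xs _).symm
        have hdr : xs.drop (xs.takeWhile (fun a => a == x)).length
            = xs.dropWhile (fun a => a == x) := (dropWhile_eq_drop xs _).symm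
        have hgp : groupPairs ((x :: xs).zip (y :: ys)) =
            ((x, y) :: (xs.zip ys).takeWhile (fun q => q.1 == x)) ::
              groupPairs ((xs.zip ys).dropWhile (fun q => q.1 == x)) := by
          rw [show (x :: xs).zip (y :: ys) = (x, y) :: xs.zip ys from rfl, groupPairs]
        have hih := ih (xs.dropWhile (fun a => a == x))
          (ys.drop (xs.takeWhile (fun a => a == x)).length)
          (by rw [← hdr, List.length_drop]; omega)
          (by rw [← hdr, List.length_drop, List.length_drop]; omega)
        rw [← zip_dropWhile x xs ys hlen] at hih
        refine ⟨?_, ?_⟩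
        · rw [rle, chopR, hgp]
          simp only [List.map_cons]
          congr 1
          · rw [List.take_succ_cons, htk, zip_takeWhile_fst x xs ys hlen]
          · rw [List.drop_succ_cons, hdr]
            exact hih.1
        · rw [rle, chopR, hgp]
          simp only [List.map_cons]
          congr 1
          · rw [List.take_succ_cons, zip_takeWhile_snd x xs ys hlen]
          · rw [List.drop_succ_cons]
            exact hih.2

-- Invariant for A's fold: the state is a finished prefix of groups plus an open run
-- ending in v; processing ps extends the open run with the leading v-run of ps and
-- the rest groups exactly as groupPairs does.
theorem foldA_inv (ps : List (Int × Int)) :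
    ∀ (G1 G2 : List (List Int)) (r1 r2 : List Int) (v : Int), r1.getLastD 0 = v →
    List.foldl stepA (G1 ++ [r1], G2 ++ [r2]) ps =
      (G1 ++ [r1 ++ (ps.takeWhile (fun q => q.1 == v)).map Prod.fst]
          ++ (groupPairs (ps.dropWhile (fun q => q.1 == v))).map (List.map Prod.fst),
       G2 ++ [r2 ++ (ps.takeWhile (fun q => q.1 == v)).map Prod.snd]
          ++ (groupPairs (ps.dropWhile (fun q => q.1 == v))).map (List.map Prod.snd)) := by
  induction ps with
  | nil =>
    intro G1 G2 r1 r2 v hv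
    simp [groupPairs]
  | cons p ps ih =>
    intro G1 G2 r1 r2 v hv
    have hv' : r1.getLast?.getD 0 = v := by
      rw [← List.getLastD_eq_getLast?]; exact hv
    by_cases h : p.1 = v
    · have hstep : stepA (G1 ++ [r1], G2 ++ [r2]) p =
          (G1 ++ [r1 ++ [p.1]], G2 ++ [r2 ++ [p.2]]) := by
        simp [stepA, hv', h]
      rw [List.foldl_cons, hstep,
        ih G1 G2 (r1 ++ [p.1]) (r2 ++ [p.2]) v (by simp [h])]
      simp [h]
    · have hstep : stepA (G1 ++ [r1], G2 ++ [r2]) p =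
          ((G1 ++ [r1]) ++ [[p.1]], (G2 ++ [r2]) ++ [[p.2]]) := by
        simp [stepA, hv', h]
      rw [List.foldl_cons, hstep,
        ih (G1 ++ [r1]) (G2 ++ [r2]) [p.1] [p.2] p.1 (by simp)]
      simp [h, groupPairs]

theorem A_eq_groupPairs (l1 l2 : List Int) :
    group_list_using_l1 l1 l2 =
      ((groupPairs (l1.zip l2)).map (List.map Prod.fst),
       (groupPairs (l1.zip l2)).map (List.map Prod.snd)) := by
  unfold group_list_using_l1
  cases hz : l1.zip l2 with
  | nil => simp [groupPairs]
  | cons p ps =>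
    have hstep : stepA ([], []) p = ([] ++ [[p.1]], [] ++ [[p.2]]) := by
      simp [stepA]
    rw [List.foldl_cons, hstep, foldA_inv ps [] [] [p.1] [p.2] p.1 (by simp)]
    simp [groupPairs]

theorem zip_take_min : ∀ (l1 l2 : List Int),
    l1.zip l2 = (l1.take (min l1.length l2.length)).zip (l2.take (min l1.length l2.length)) := by
  intro l1
  induction l1 with
  | nil => intro l2; simp
  | cons a as ih =>
    intro l2
    cases l2 with
    | nil => simp
    | cons b bs =>
      have : min (as.length + 1) (bs.length + 1) = min as.length bs.length + 1 := by omega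
      simp only [List.length_cons, this, List.take_succ_cons, List.zip_cons_cons]
      exact congrArg _ (ih bs)

-- ===== VERDICT (by name: the statement is the Claim_ definition above) =====
theorem group_list_using_l1_spec : Claim_equal_group_list_using_l1 := by
  intro l1 l2 _
  unfold Spec_group_list_using_l1 group_list_using_l1_alt
  dsimp only
  rw [A_eq_groupPairs]
  set n := min l1.length l2.length with hn
  have h1 : (l1.take n).length = n := by
    rw [List.length_take]; omega
  have h2 : (l2.take n).length = n := by
    rw [List.length_take]; omega
  rw [pvChop_eq, pvChop_eq]
  unfold pvRunLengths
  rw [runAux_eq_rle (l1.take n) (l1.take n).length 0 (by omega), List.drop_zero]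
  have := chop_rle ((l1.take n).length) (l1.take n) (l2.take n) (Nat.le_refl _) (by omega)
  rw [zip_take_min l1 l2, ← hn]
  exact Prod.ext this.1.symm this.2.symm
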